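-- pv_equiv track=rewrite | github.com/jaspreetdogra/coddy.tech | Python/Journey/05_Daily_Challenges/2025-09-26_tongue_twister_comp.py | organize_tongue_twister_competition
-- ===== SOURCE A (Python) =====
-- def organize_tongue_twister_competition(tongue_twisters, difficulty_levels, participants, initial_scores):
--     """
--     Organizes a tongue twister competition by assigning tongue twisters to participants
--     based on their initial scores and the difficulty of the twisters, then calculates
--     and ranks their final scores.
--
--     Parameters:
--     - tongue_twisters (list of str): The tongue twisters.
--     - difficulty_levels (list of int): The corresponding difficulty of each twister.
--     - participants (list of str): Participant names.
--     - initial_scores (list of int): Initial scores of participants.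
--
--     Returns:
--     - results (list of [str, str, str]): Each sublist contains [name, assigned_twister, final_score].
--     """
--
--     # Step 1: Pair tongue twisters with difficulty levels and sort by difficulty descending
--     twisters = sorted(zip(tongue_twisters, difficulty_levels), key=lambda x: x[1], reverse=True)
--
--     # Step 2: Pair participants with initial scores and sort by score descending
--     players = sorted(zip(participants, initial_scores), key=lambda x: x[1], reverse=True)
--
--     # Step 3: Assign tongue twisters to participants
--     results = []
--     for (name, init_score), (twister, diff) in zip(players, twisters):
--         final_score = init_score + diff * 10
--         results.append([name, twister, str(final_score)])
--
--     # Step 4: Sort results by final score descending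
--     results.sort(key=lambda x: int(x[2]), reverse=True)
--     return results
-- ===== SOURCE B (Python) =====
-- def organize_tongue_twister_competition(tongue_twisters, difficulty_levels, participants, initial_scores):
--     # Sort twisters by difficulty descending and players by score descending,
--     # then emit the paired rows directly: two descending sequences summed
--     # term-by-term are already descending, so A's final stable sort is the identity.
--     twisters = sorted(zip(tongue_twisters, difficulty_levels), key=lambda x: x[1], reverse=True)
--     players = sorted(zip(participants, initial_scores), key=lambda x: x[1], reverse=True)
--     return [[name, twister, str(init_score + diff * 10)]
--             for (name, init_score), (twister, diff) in zip(players, twisters)]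
-- ===== Notes on version B (the rewrite author's own statement) =====
-- stated objective: simpler
-- what changed: B drops A's final results.sort entirely: after pairing score-descending players with difficulty-descending twisters, the termwise sums init_score + diff*10 are already descending, so A's stable descending sort is the identity and B just emits the paired rows with a single comprehension.
import Mathlib
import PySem

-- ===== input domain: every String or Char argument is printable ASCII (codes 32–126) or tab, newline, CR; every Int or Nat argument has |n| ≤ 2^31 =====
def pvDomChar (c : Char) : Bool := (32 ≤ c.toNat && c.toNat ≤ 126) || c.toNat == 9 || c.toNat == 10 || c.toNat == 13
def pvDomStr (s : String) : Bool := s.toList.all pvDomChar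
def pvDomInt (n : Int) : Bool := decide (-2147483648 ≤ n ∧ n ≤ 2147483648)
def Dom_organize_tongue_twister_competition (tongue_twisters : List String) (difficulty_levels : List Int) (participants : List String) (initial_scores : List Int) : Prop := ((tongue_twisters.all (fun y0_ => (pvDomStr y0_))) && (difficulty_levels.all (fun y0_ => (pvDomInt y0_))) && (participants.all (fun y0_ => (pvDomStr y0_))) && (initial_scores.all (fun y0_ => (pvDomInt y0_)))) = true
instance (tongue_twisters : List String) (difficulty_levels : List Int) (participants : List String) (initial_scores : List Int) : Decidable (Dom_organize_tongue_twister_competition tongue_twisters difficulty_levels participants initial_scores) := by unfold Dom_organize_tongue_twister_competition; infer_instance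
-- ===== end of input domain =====

-- B drops A's final results.sort: the paired rows are already emitted in descending
-- final-score order, so the stable sort is the identity (objective: simpler).

-- ===== PORT A =====
-- Hand port of Python's int(s), exact on the strings it is applied to here: the sort key
-- receives only x[2] = str(k) for an Int k (rows are built with PySem.Int.toStr), i.e.
-- canonical '-?[0-9]+' strings, on which this parser computes exactly what int(s) does.
def pvDigitsVal (ds : List Char) : Int :=
  ds.foldl (fun a c => 10 * a + ((c.toNat : Int) - 48)) 0

def pvParseInt (s : String) : Int :=
  match s.toList with
  | '-' :: ds => -(pvDigitsVal ds)
  | ds => pvDigitsVal ds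

def organize_tongue_twister_competition (tongue_twisters : List String) (difficulty_levels : List Int) (participants : List String) (initial_scores : List Int) : List (List String) :=
  -- Step 1: twisters sorted by difficulty descending
  let twisters := PySem.List.sorted (tongue_twisters.zip difficulty_levels) (fun x => x.2) true
  -- Step 2: players sorted by score descending
  let players := PySem.List.sorted (participants.zip initial_scores) (fun x => x.2) true
  -- Step 3: results.append([name, twister, str(final_score)]) loop
  let results := (players.zip twisters).foldl
    (fun acc pt => acc ++ [[pt.1.1, pt.2.1, PySem.Int.toStr (pt.1.2 + pt.2.2 * 10)]]) []
  -- Step 4: results.sort(key=lambda x: int(x[2]), reverse=True)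
  -- x[2] never raises here (every row has length 3), so pyGetD with a dummy default is exact.
  PySem.List.sorted results (fun x => pvParseInt (PySem.List.pyGetD x 2 "")) true

-- ===== PORT B =====
def organize_tongue_twister_competition_alt (tongue_twisters : List String) (difficulty_levels : List Int) (participants : List String) (initial_scores : List Int) : List (List String) :=
  let twisters := PySem.List.sorted (tongue_twisters.zip difficulty_levels) (fun x => x.2) true
  let players := PySem.List.sorted (participants.zip initial_scores) (fun x => x.2) true
  (players.zip twisters).map
    (fun pt => [pt.1.1, pt.2.1, PySem.Int.toStr (pt.1.2 + pt.2.2 * 10)])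

-- ===== PRECONDITION & SPEC =====
def Spec_organize_tongue_twister_competition (tongue_twisters : List String) (difficulty_levels : List Int) (participants : List String) (initial_scores : List Int) (out : List (List String)) : Prop := out = organize_tongue_twister_competition_alt tongue_twisters difficulty_levels participants initial_scores
instance (tongue_twisters : List String) (difficulty_levels : List Int) (participants : List String) (initial_scores : List Int) (out : List (List String)) : Decidable (Spec_organize_tongue_twister_competition tongue_twisters difficulty_levels participants initial_scores out) := by unfold Spec_organize_tongue_twister_competition; infer_instance

-- ===== CLAIM (what is proved, stated in full; the proofs are below) =====
def Claim_equal_organize_tongue_twister_competition : Prop := ∀ (tongue_twisters : List String) (difficulty_levels : List Int) (participants : List String) (initial_scores : List Int), Dom_organize_tongue_twister_competition tongue_twisters difficulty_levels participants initial_scores → Spec_organize_tongue_twister_competition tongue_twisters difficulty_levels participants initial_scores (organize_tongue_twister_competition tongue_twisters difficulty_levels participants initial_scores)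

-- ===== LEMMAS AND PROOFS =====

-- digit-fold of the canonical decimal digits of m is m
theorem pvDigitsVal_toDigits (m : Nat) : pvDigitsVal (Nat.toDigits 10 m) = (m : Int) := by
  induction m using Nat.strong_induction_on with
  | _ m ih =>
    rw [Nat.toDigits_eq_if (by norm_num)]
    split
    · rename_i h
      interval_cases m <;> decide
    · rename_i h
      push Not at h
      have hlt : m / 10 < m := Nat.div_lt_self (by omega) (by omega)
      have hmod : m % 10 < 10 := Nat.mod_lt _ (by norm_num)
      simp only [pvDigitsVal, List.foldl_append, List.foldl_cons, List.foldl_nil]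
      have := ih (m / 10) hlt
      simp only [pvDigitsVal] at this
      rw [this]
      have hchar : ((m % 10).digitChar.toNat : Int) - 48 = ((m % 10 : Nat) : Int) := by
        have h10 := hmod
        interval_cases h : (m % 10) <;> decide
      rw [hchar]
      have := Nat.div_add_mod m 10
      push_cast
      omega

-- the hand parser inverts str(n)
theorem pvParseInt_toStr (n : Int) : pvParseInt (PySem.Int.toStr n) = n := by
  unfold pvParseInt
  rw [PySem.Int.toList_toStr]
  unfold PySem.Int.toChars
  by_cases hneg : n < 0
  · rw [if_pos hneg]
    show -(pvDigitsVal (Nat.toDigits 10 n.natAbs)) = n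
    rw [pvDigitsVal_toDigits]
    omega
  · rw [if_neg hneg]
    -- the leading character is a digit, so the '-' arm of the match never fires
    have hne : Nat.toDigits 10 n.toNat ≠ [] := by
      have := @Nat.length_toDigits_pos 10 n.toNat
      intro h; simp [h] at this
    obtain ⟨c, cs, hcons⟩ := List.exists_cons_of_ne_nil hne
    have hc : c.isDigit = true :=
      Nat.isDigit_of_mem_toDigits (by norm_num) (by norm_num) (hcons ▸ List.mem_cons_self)
    have hcne : c ≠ '-' := by
      intro h; rw [h] at hc; simp [Char.isDigit] at hc
    rw [hcons]
    split
    · rename_i ds heq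
      rw [List.cons_eq_cons] at heq
      exact absurd heq.1 hcne
    · rw [← hcons, pvDigitsVal_toDigits]
      omega

-- the key A's final sort computes on a pairing row is exactly its final score
theorem pv_key_row (name tw : String) (sc df : Int) :
    pvParseInt (PySem.List.pyGetD [name, tw, PySem.Int.toStr (sc + df * 10)] 2 "") =
      sc + df * 10 := by
  have : PySem.List.pyGetD [name, tw, PySem.Int.toStr (sc + df * 10)] 2 "" =
      PySem.Int.toStr (sc + df * 10) := by
    simp [PySem.List.pyGetD, PySem.List.pyGet?, PySem.List.pyIdx?]
  rw [this, pvParseInt_toStr]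

-- ===== VERDICT (by name: the statement is the Claim_ definition above) =====
theorem organize_tongue_twister_competition_spec : Claim_equal_organize_tongue_twister_competition := by
  intro tongue_twisters difficulty_levels participants initial_scores _hdom
  unfold Spec_organize_tongue_twister_competition
  unfold organize_tongue_twister_competition organize_tongue_twister_competition_alt
  simp only [PySem.List.foldl_append_singleton_eq_map, List.nil_append]
  set tw := PySem.List.sorted (tongue_twisters.zip difficulty_levels) (fun x => x.2) true with htw
  set pl := PySem.List.sorted (participants.zip initial_scores) (fun x => x.2) true with hpl
  -- the emitted rows are already in (weakly) descending final-score order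
  apply PySem.List.sorted_rev_eq_self_of_pairwise
  rw [List.pairwise_map]
  rw [List.pairwise_iff_getElem]
  intro i j hi hj hij
  have hjp : j < pl.length := lt_of_lt_of_le hj (by simp [List.length_zip])
  have hjt : j < tw.length := lt_of_lt_of_le hj (by simp [List.length_zip])
  have hip : i < pl.length := lt_of_lt_of_le hi (by simp [List.length_zip])
  have hit : i < tw.length := lt_of_lt_of_le hi (by simp [List.length_zip])
  have hzi : (pl.zip tw)[i] = (pl[i], tw[i]) := List.getElem_zip
  have hzj : (pl.zip tw)[j] = (pl[j], tw[j]) := List.getElem_zip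
  rw [hzi, hzj]
  simp only [pv_key_row]
  -- descending scores and descending difficulties, read off the sorted lists
  have hpw : pl.Pairwise (fun a b => b.2 ≤ a.2) :=
    PySem.List.sorted_pairwise_rev (participants.zip initial_scores) (fun x => x.2)
  have htww : tw.Pairwise (fun a b => b.2 ≤ a.2) :=
    PySem.List.sorted_pairwise_rev (tongue_twisters.zip difficulty_levels) (fun x => x.2)
  have hp := List.pairwise_iff_getElem.mp hpw i j hip hjp hij
  have ht := List.pairwise_iff_getElem.mp htww i j hit hjt hij
  omega
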